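-- pv_equiv track=rewrite | github.com/SobinYim/Algorithm | [Programmers] Lv2/롤케이크 자르기.py | solution
-- ===== SOURCE A (Python) =====
-- from collections import Counter
--
-- def solution(topping): #롤케이크에 올려진 토핑들의 번호
--     ans = 0
--     c = Counter(topping)
--     left = set() #철수가 현 위치에서 가질 수 있는 토핑 종류
--     diff = len(c) #철수와 동생의 토핑 종류 개수 차이
--     for t in topping:
--         c[t] -= 1
--         if t not in left: #철수에게 없는 토핑이라면
--             left.add(t)
--             diff-=1
--         if not c[t]: #더이상 해당 토핑이 동생에게 없다면
--             diff-=1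
--         if not diff: #철수와 동생이 가진 토핑 종류의 수가 같다면
--             ans += 1
--         elif diff<0: #차가 0 미만이라면 break
--             break
--     return ans
-- ===== SOURCE B (Python) =====
-- def solution(topping):
--     # Suffix pass: right[i] = number of distinct toppings strictly after index i.
--     right = []
--     seen = set()
--     for t in reversed(topping):
--         right.append(len(seen))
--         seen.add(t)
--     right.reverse()
--     # Prefix pass: compare the growing left-side variety with the precomputed right counts.
--     ans = 0
--     left = set()
--     for t, r in zip(topping, right):
--         left.add(t)
--         if len(left) == r:
--             ans += 1
--     return ans
-- ===== Notes on version B (the rewrite author's own statement) =====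
-- stated objective: alternative
-- what changed: A makes one incremental pass maintaining a Counter and a running variety-difference with an early break; B precomputes a suffix distinct-count array in a right-to-left pass and then compares it against a growing prefix set in a second pass, with no counter and no break (valid because the variety difference is monotone).
import Mathlib
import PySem

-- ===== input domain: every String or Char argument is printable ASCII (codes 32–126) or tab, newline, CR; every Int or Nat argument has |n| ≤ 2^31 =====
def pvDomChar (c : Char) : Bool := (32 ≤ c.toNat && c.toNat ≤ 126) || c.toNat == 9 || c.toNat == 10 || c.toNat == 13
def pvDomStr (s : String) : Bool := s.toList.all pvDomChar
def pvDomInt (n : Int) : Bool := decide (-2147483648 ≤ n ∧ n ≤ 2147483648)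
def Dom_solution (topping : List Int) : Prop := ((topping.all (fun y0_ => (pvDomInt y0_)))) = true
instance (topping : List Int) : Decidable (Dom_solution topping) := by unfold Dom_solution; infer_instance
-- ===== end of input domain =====

-- B replaces A's single incremental pass (Counter + running difference with an early break)
-- by a precomputed suffix distinct-count array plus a prefix comparison pass; objective: alternative.


-- ===== PORT A =====
-- the 'for t in topping' loop with its break, state (ans, c, left, diff)
def solutionLoopA : List Int → Int → PySem.Dict Int Int → PySem.Set Int → Int → Int
  | [], ans, _, _, _ => ans
  | t :: rest, ans, c, left, diff =>
    let c := c.modify t 0 (· - 1)                                   -- c[t] -= 1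
    let inL := PySem.Set.contains left t
    let left := if inL then left else PySem.Set.add left t          -- if t not in left: left.add(t)
    let diff := if inL then diff else diff - 1                      --                   diff -= 1
    let diff := if c.getD t 0 = 0 then diff - 1 else diff           -- if not c[t]: diff -= 1
    if diff = 0 then solutionLoopA rest (ans + 1) c left diff       -- if not diff: ans += 1
    else if diff < 0 then ans                                       -- elif diff < 0: break
    else solutionLoopA rest ans c left diff

def solution (topping : List Int) : Int :=
  let c := PySem.Dict.counter topping
  solutionLoopA topping 0 c PySem.Set.empty (c.size : Int)

-- ===== PORT B =====
-- first loop: for t in reversed(topping): right.append(len(seen)); seen.add(t) — then right.reverse()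
def solutionRight (topping : List Int) : List Int :=
  ((topping.reverse.foldl
      (fun (st : List Int × PySem.Set Int) t =>
        (st.1 ++ [(PySem.Set.len st.2 : Int)], PySem.Set.add st.2 t))
      ([], PySem.Set.empty)).1).reverse

def solution_alt (topping : List Int) : Int :=
  let right := solutionRight topping
  ((topping.zip right).foldl
      (fun (st : Int × PySem.Set Int) p =>
        ((if (PySem.Set.len (PySem.Set.add st.2 p.1) : Int) = p.2 then st.1 + 1 else st.1),
         PySem.Set.add st.2 p.1))
      (0, PySem.Set.empty)).1

-- ===== PRECONDITION & SPEC =====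
def Spec_solution (topping : List Int) (out : Int) : Prop := out = solution_alt topping
instance (topping : List Int) (out : Int) : Decidable (Spec_solution topping out) := by unfold Spec_solution; infer_instance

-- ===== CLAIM (what is proved, stated in full; the proofs are below) =====
def Claim_equal_solution : Prop := ∀ (topping : List Int), Dom_solution topping → Spec_solution topping (solution topping)

-- ===== LEMMAS AND PROOFS =====

-- number of distinct elements of a list
def dcount (l : List Int) : Nat := l.toFinset.card

-- common recursive specification: walk the list with the growing left set, counting the
-- positions where the left-side variety equals the variety of the remaining suffix
def specCount : List Int → PySem.Set Int → Int
  | [], _ => 0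
  | t :: rest, left =>
    let left' := PySem.Set.add left t
    (if (left'.length : Int) = (dcount rest : Int) then 1 else 0) + specCount rest left'

theorem dcount_cons (t : Int) (l : List Int) :
    dcount (t :: l) = if t ∈ l then dcount l else dcount l + 1 := by
  simp only [dcount, List.toFinset_cons]
  by_cases h : t ∈ l
  · simp [h, Finset.insert_eq_self.mpr (List.mem_toFinset.mpr h)]
  · rw [Finset.card_insert_of_notMem (by simpa using h)]
    simp [h]

theorem add_length (s : PySem.Set Int) (t : Int) :
    (PySem.Set.add s t).length = if t ∈ s then s.length else s.length + 1 := by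
  by_cases h : t ∈ s
  · rw [PySem.Set.add_of_mem h, if_pos h]
  · rw [PySem.Set.add_of_not_mem h, if_neg h]; simp

theorem ofList_length_eq_dcount (l : List Int) :
    (PySem.Set.ofList l).length = dcount l := by
  induction l using List.reverseRecOn with
  | nil => simp [dcount, PySem.Set.ofList_nil]
  | append_singleton xs x ih =>
    have hperm : dcount (xs ++ [x]) = dcount (x :: xs) := by
      simp [dcount, List.toFinset_append, List.toFinset_cons]
    rw [PySem.Set.ofList_append_singleton, add_length, hperm, dcount_cons]
    by_cases h : x ∈ xs
    · rw [if_pos ((PySem.Set.mem_ofList xs x).mpr h), if_pos h, ih]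
    · rw [if_neg (fun hx => h ((PySem.Set.mem_ofList xs x).mp hx)), if_neg h, ih]

theorem specCount_zero (l : List Int) (left : PySem.Set Int)
    (h : dcount l < left.length) : specCount l left = 0 := by
  induction l generalizing left with
  | nil => rfl
  | cons t rest ih =>
    have hle : dcount rest ≤ dcount (t :: rest) := by
      rw [dcount_cons]; split <;> omega
    have hlen : left.length ≤ (PySem.Set.add left t).length := by
      rw [add_length]; split <;> omega
    have hrest : dcount rest < (PySem.Set.add left t).length := by omega
    simp only [specCount]
    rw [if_neg (by exact_mod_cast (by omega :
          ¬ ((PySem.Set.add left t).length : Int) = (dcount rest : Int))),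
        ih _ hrest]
    simp

theorem loopA_eq (rest : List Int) :
    ∀ (ans : Int) (c : PySem.Dict Int Int) (left : PySem.Set Int) (diff : Int),
    (∀ v, c.getD v 0 = (rest.count v : Int)) →
    diff = (dcount rest : Int) - (left.length : Int) →
    solutionLoopA rest ans c left diff = ans + specCount rest left := by
  induction rest with
  | nil => intro ans c left diff _ _; simp [solutionLoopA, specCount]
  | cons t rest ih =>
    intro ans c left diff hc hd
    simp only [solutionLoopA]
    -- the decremented counter counts the strict suffix
    have hcount : ∀ v, (c.modify t 0 (· - 1)).getD v 0 = (rest.count v : Int) := by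
      intro v
      rw [PySem.Dict.getD_modify]
      by_cases hv : v = t
      · rw [if_pos hv, hc, hv]
        have : (t :: rest).count t = rest.count t + 1 := by simp
        rw [this]; push_cast; ring
      · rw [if_neg hv, hc]
        have : (t :: rest).count v = rest.count v := by
          simp only [List.count_cons]
          simp
          exact fun h => hv h.symm
        rw [this]
    -- the updated left set is left.add t in both branches
    have hL : (if PySem.Set.contains left t then left else PySem.Set.add left t)
        = PySem.Set.add left t := by
      by_cases h : t ∈ left
      · rw [if_pos ((PySem.Set.contains_iff left t).mpr h), PySem.Set.add_of_mem h]
      · rw [if_neg (by simpa [PySem.Set.contains_iff] using h)]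
    -- the updated difference is the suffix variety minus the new left variety
    have hD : (if (c.modify t 0 (· - 1)).getD t 0 = 0
          then (if PySem.Set.contains left t then diff else diff - 1) - 1
          else (if PySem.Set.contains left t then diff else diff - 1))
        = (dcount rest : Int) - ((PySem.Set.add left t).length : Int) := by
      have hcnt : (c.modify t 0 (· - 1)).getD t 0 = 0 ↔ t ∉ rest := by
        rw [hcount t, Nat.cast_eq_zero, List.count_eq_zero]
      have hdc : dcount (t :: rest) = dcount rest + (if t ∈ rest then 0 else 1) := by
        rw [dcount_cons]; split <;> omega
      have hal : (PySem.Set.add left t).length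
          = left.length + (if t ∈ left then 0 else 1) := by
        rw [add_length]; split <;> omega
      by_cases hmem : t ∈ left <;> by_cases hsuf : t ∈ rest
      · have hcb : PySem.Set.contains left t = true :=
          (PySem.Set.contains_iff left t).mpr hmem
        have hnz : ¬ ((c.modify t 0 (· - 1)).getD t 0 = 0) := by
          rw [hcnt]; simpa using hsuf
        simp only [hcb, if_true, if_neg hnz]
        rw [hd, hdc, hal]; simp [hmem, hsuf]
      · have hcb : PySem.Set.contains left t = true :=
          (PySem.Set.contains_iff left t).mpr hmem
        have hz : (c.modify t 0 (· - 1)).getD t 0 = 0 := hcnt.mpr hsuf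
        simp only [hcb, if_true, if_pos hz]
        rw [hd, hdc, hal]; simp [hmem, hsuf]; ring
      · have hcb : ¬ (PySem.Set.contains left t = true) := by
          simpa [PySem.Set.contains_iff] using hmem
        have hnz : ¬ ((c.modify t 0 (· - 1)).getD t 0 = 0) := by
          rw [hcnt]; simpa using hsuf
        simp only [if_neg hcb, if_neg hnz]
        rw [hd, hdc, hal]; simp [hmem, hsuf]; ring
      · have hcb : ¬ (PySem.Set.contains left t = true) := by
          simpa [PySem.Set.contains_iff] using hmem
        have hz : (c.modify t 0 (· - 1)).getD t 0 = 0 := hcnt.mpr hsuf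
        simp only [if_neg hcb, if_pos hz]
        rw [hd, hdc, hal]; simp [hmem, hsuf]; ring
    rw [hL, hD]
    simp only [specCount]
    by_cases hz : (dcount rest : Int) - ((PySem.Set.add left t).length : Int) = 0
    · rw [if_pos hz, ih (ans + 1) _ _ _ hcount (by omega)]
      have : ((PySem.Set.add left t).length : Int) = (dcount rest : Int) := by omega
      rw [if_pos this]; ring
    · rw [if_neg hz]
      have hne : ¬ ((PySem.Set.add left t).length : Int) = (dcount rest : Int) := by omega
      by_cases hneg : (dcount rest : Int) - ((PySem.Set.add left t).length : Int) < 0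
      · rw [if_pos hneg, if_neg hne,
            specCount_zero rest (PySem.Set.add left t) (by omega)]
        ring
      · rw [if_neg hneg, ih ans _ _ _ hcount (by omega), if_neg hne]
        ring

-- the second component of B's first fold is the set of the traversed elements
theorem solutionRight_snd (l : List Int) :
    ∀ (acc : List Int) (seen : PySem.Set Int),
    (l.foldl (fun (st : List Int × PySem.Set Int) t =>
        (st.1 ++ [(PySem.Set.len st.2 : Int)], PySem.Set.add st.2 t)) (acc, seen)).2
      = PySem.Set.update seen l := by
  induction l with
  | nil => intro acc seen; simp [PySem.Set.update_nil]
  | cons x xs ih =>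
    intro acc seen
    simp only [List.foldl_cons]
    rw [ih, PySem.Set.update_cons]

theorem right_cons (t : Int) (xs : List Int) :
    solutionRight (t :: xs) = (dcount xs : Int) :: solutionRight xs := by
  simp only [solutionRight, List.reverse_cons, List.foldl_append, List.foldl_cons,
    List.foldl_nil]
  rw [solutionRight_snd xs.reverse [] PySem.Set.empty]
  have hup : PySem.Set.update PySem.Set.empty xs.reverse = PySem.Set.ofList xs.reverse :=
    PySem.Set.update_nil_left xs.reverse
  rw [hup]
  have hlen : (PySem.Set.ofList xs.reverse).length = dcount xs := by
    rw [ofList_length_eq_dcount]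
    simp [dcount, List.toFinset_reverse]
  simp [PySem.Set.len, hlen]

theorem loopB_eq (xs : List Int) :
    ∀ (ans : Int) (left : PySem.Set Int),
    ((xs.zip (solutionRight xs)).foldl
      (fun (st : Int × PySem.Set Int) p =>
        ((if (PySem.Set.len (PySem.Set.add st.2 p.1) : Int) = p.2 then st.1 + 1 else st.1),
         PySem.Set.add st.2 p.1))
      (ans, left)).1 = ans + specCount xs left := by
  induction xs with
  | nil => intro ans left; simp [solutionRight, specCount]
  | cons t xs ih =>
    intro ans left
    rw [right_cons, List.zip_cons_cons, List.foldl_cons, ih]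
    simp only [specCount, PySem.Set.len]
    by_cases h : ((PySem.Set.add left t).length : Int) = (dcount xs : Int)
    · rw [if_pos h, if_pos h]; ring
    · rw [if_neg h, if_neg h]; ring

-- ===== VERDICT (by name: the statement is the Claim_ definition above) =====
theorem solution_spec : Claim_equal_solution := by
  intro topping _
  unfold Spec_solution solution solution_alt
  rw [loopB_eq topping 0 PySem.Set.empty]
  have hsize : (PySem.Dict.counter topping).size = dcount topping := by
    have h1 : (PySem.Dict.counter topping).size
        = (PySem.Dict.counter topping).keys.length := by
      simp [PySem.Dict.size, PySem.Dict.keys]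
    rw [h1, PySem.Dict.keys_counter, ofList_length_eq_dcount]
  rw [loopA_eq topping 0 (PySem.Dict.counter topping) PySem.Set.empty _
      (fun v => by simp [PySem.Dict.getD_counter topping v])
      (by rw [hsize]; simp [PySem.Set.empty])]
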